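-- pv_equiv track=rewrite | github.com/zwvista/LogicPuzzlesAutomator | Puzzles/puzzle_analyzer.py | format_matrix_with_walls
-- ===== SOURCE A (Python) =====
-- def format_matrix_with_walls(
--         matrix: list[list[str]],
--         walls: tuple[set[tuple[int, int]], set[tuple[int, int]]]
-- ) -> str:
--     rows, cols = len(matrix), len(matrix[0])
--     row_walls, col_walls = walls
--     lines = []
--     for r in range(rows + 1):
--         line = []
--         for c in range(cols + 1):
--             line.append(' ')
--             if c == cols: break
--             line.append('-' if (r, c) in row_walls else ' ')
--         lines.append(''.join(line) + '`')
--         if r == rows: break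
--         digits = matrix[r]
--         line = []
--         for c in range(cols + 1):
--             line.append('|' if (r, c) in col_walls else ' ')
--             if c == cols: break
--             line.append(digits[c])
--         lines.append(''.join(line) + '`')
--     result = '\n'.join(lines)
--     return result
-- ===== SOURCE B (Python) =====
-- def format_matrix_with_walls(
--         matrix: list[list[str]],
--         walls: tuple[set[tuple[int, int]], set[tuple[int, int]]]
-- ) -> str:
--     rows, cols = len(matrix), len(matrix[0])
--     row_walls, col_walls = walls
--     lines = []
--     for i in range(2 * rows + 1):
--         cells = []
--         for j in range(2 * cols + 1):
--             if i % 2 == 0 and j % 2 == 0: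
--                 cells.append(' ')
--             elif i % 2 == 0:
--                 cells.append('-' if (i // 2, j // 2) in row_walls else ' ')
--             elif j % 2 == 0:
--                 cells.append('|' if (i // 2, j // 2) in col_walls else ' ')
--             else:
--                 cells.append(matrix[i // 2][j // 2])
--         lines.append(''.join(cells) + '`')
--     return '\n'.join(lines)
-- ===== Notes on version B (the rewrite author's own statement) =====
-- stated objective: alternative
-- what changed: Replaces A's interleaved two-phase row loops with breaks by a single uniform (2*rows+1) x (2*cols+1) cell grid where each cell is chosen by the parity of its coordinates.
import Mathlib
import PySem

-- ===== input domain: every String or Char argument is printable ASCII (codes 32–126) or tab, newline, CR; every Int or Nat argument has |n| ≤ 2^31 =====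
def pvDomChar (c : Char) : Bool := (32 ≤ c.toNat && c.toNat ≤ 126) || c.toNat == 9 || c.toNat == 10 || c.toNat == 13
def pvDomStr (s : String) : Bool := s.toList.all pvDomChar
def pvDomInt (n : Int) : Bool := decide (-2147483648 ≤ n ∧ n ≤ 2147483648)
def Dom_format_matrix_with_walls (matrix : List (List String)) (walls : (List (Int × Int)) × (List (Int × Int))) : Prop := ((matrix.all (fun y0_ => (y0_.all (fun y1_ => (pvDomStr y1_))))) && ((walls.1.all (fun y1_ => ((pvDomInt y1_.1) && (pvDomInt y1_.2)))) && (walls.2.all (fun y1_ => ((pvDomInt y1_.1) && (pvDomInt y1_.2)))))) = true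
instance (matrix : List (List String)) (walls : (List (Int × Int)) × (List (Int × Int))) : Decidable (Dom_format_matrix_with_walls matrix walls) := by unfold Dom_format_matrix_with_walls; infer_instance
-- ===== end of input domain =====

-- B replaces A's interleaved two-phase row loops (with breaks) by one uniform parity-indexed
-- (2*rows+1) × (2*cols+1) cell grid; alternative decomposition, same cost.

-- ===== PORT A =====
-- inner loop `for c in range(cols+1): line.append(' '); if c == cols: break; line.append(wall)`
def pvA_hline (rw : List (Int × Int)) (r : Int) (cols : Int) : List Int → List String → List String
  | [], line => line
  | c :: rest, line =>
    let line := line ++ [" "]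
    if c = cols then line
    else pvA_hline rw r cols rest (line ++ [if rw.contains (r, c) then "-" else " "])

-- inner loop `for c in range(cols+1): line.append(wall); if c == cols: break; line.append(digits[c])`
def pvA_vline (cw : List (Int × Int)) (r : Int) (cols : Int) (digits : List String) : List Int → List String → List String
  | [], line => line
  | c :: rest, line =>
    let line := line ++ [if cw.contains (r, c) then "|" else " "]
    if c = cols then line
    else pvA_vline cw r cols digits rest (line ++ [(PySem.List.pyGet? digits c).getD ""])
    -- digits[c]: Pre_ guarantees c is in range, so the default is never the value

-- outer loop `for r in range(rows+1): … ; if r == rows: break; …`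
def pvA_outer (matrix : List (List String)) (rw cw : List (Int × Int)) (rows cols : Int) : List Int → List String → List String
  | [], lines => lines
  | r :: rest, lines =>
    let lines := lines ++ [PySem.Str.join "" (pvA_hline rw r cols (PySem.List.pyRange 0 (cols + 1) 1) []) ++ "`"]
    if r = rows then lines
    else
      let digits := (PySem.List.pyGet? matrix r).getD []   -- matrix[r]: always in range for r < rows
      let lines := lines ++ [PySem.Str.join "" (pvA_vline cw r cols digits (PySem.List.pyRange 0 (cols + 1) 1) []) ++ "`"]
      pvA_outer matrix rw cw rows cols rest lines

def format_matrix_with_walls (matrix : List (List String)) (walls : (List (Int × Int)) × (List (Int × Int))) : String :=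
  let rows : Int := matrix.length
  let cols : Int := ((PySem.List.pyGet? matrix 0).getD []).length  -- matrix[0]; Pre_ excludes the empty matrix (IndexError)
  let row_walls := walls.1
  let col_walls := walls.2
  let lines := pvA_outer matrix row_walls col_walls rows cols (PySem.List.pyRange 0 (rows + 1) 1) []
  PySem.Str.join "\n" lines

-- ===== PORT B =====
def pvB_cell (matrix : List (List String)) (rw cw : List (Int × Int)) (i j : Int) : String :=
  if PySem.Int.mod i 2 = 0 ∧ PySem.Int.mod j 2 = 0 then " "
  else if PySem.Int.mod i 2 = 0 then
    (if rw.contains (PySem.Int.floordiv i 2, PySem.Int.floordiv j 2) then "-" else " ")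
  else if PySem.Int.mod j 2 = 0 then
    (if cw.contains (PySem.Int.floordiv i 2, PySem.Int.floordiv j 2) then "|" else " ")
  else
    (PySem.List.pyGet? ((PySem.List.pyGet? matrix (PySem.Int.floordiv i 2)).getD [])
        (PySem.Int.floordiv j 2)).getD ""   -- matrix[i//2][j//2]; in range under Pre_

def format_matrix_with_walls_alt (matrix : List (List String)) (walls : (List (Int × Int)) × (List (Int × Int))) : String :=
  let rows : Int := matrix.length
  let cols : Int := ((PySem.List.pyGet? matrix 0).getD []).length  -- matrix[0]; Pre_ excludes the empty matrix
  let row_walls := walls.1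
  let col_walls := walls.2
  let lines := (PySem.List.pyRange 0 (2 * rows + 1) 1).map (fun i =>
    PySem.Str.join "" ((PySem.List.pyRange 0 (2 * cols + 1) 1).map
      (fun j => pvB_cell matrix row_walls col_walls i j)) ++ "`")
  PySem.Str.join "\n" lines

-- ===== PRECONDITION & SPEC =====
-- Pre_ excludes exactly where the Python raises IndexError: the empty matrix (matrix[0])
-- and matrices whose later rows are shorter than row 0 (digits[c]).
def Pre_format_matrix_with_walls (matrix : List (List String)) (walls : (List (Int × Int)) × (List (Int × Int))) : Prop :=
  matrix ≠ [] ∧ ∀ row ∈ matrix, (matrix.headD []).length ≤ row.length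
instance (matrix : List (List String)) (walls : (List (Int × Int)) × (List (Int × Int))) : Decidable (Pre_format_matrix_with_walls matrix walls) := by unfold Pre_format_matrix_with_walls; infer_instance

def pvWitness_format_matrix_with_walls : List (List String) × ((List (Int × Int)) × (List (Int × Int))) :=
  ([["1", "2"], ["3", "4"]], ([(0, 0), (2, 1)], [(1, 1)]))

def Spec_format_matrix_with_walls (matrix : List (List String)) (walls : (List (Int × Int)) × (List (Int × Int))) (out : String) : Prop := out = format_matrix_with_walls_alt matrix walls
instance (matrix : List (List String)) (walls : (List (Int × Int)) × (List (Int × Int))) (out : String) : Decidable (Spec_format_matrix_with_walls matrix walls out) := by unfold Spec_format_matrix_with_walls; infer_instance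

-- ===== CLAIM (what is proved, stated in full; the proofs are below) =====
def Claim_equal_format_matrix_with_walls : Prop := ∀ (matrix : List (List String)) (walls : (List (Int × Int)) × (List (Int × Int))), Dom_format_matrix_with_walls matrix walls → Pre_format_matrix_with_walls matrix walls → Spec_format_matrix_with_walls matrix walls (format_matrix_with_walls matrix walls)

-- ===== LEMMAS AND PROOFS =====

-- peeling the first element off a flatMap over range (n+1)
theorem pv_flatMap_range_succ {α : Type} (f : Nat → List α) (n : Nat) :
    (List.range (n + 1)).flatMap f = f 0 ++ (List.range n).flatMap (fun t => f (t + 1)) := by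
  rw [List.range_succ_eq_map]
  simp [List.flatMap_map]

-- A's horizontal-line loop, characterised
theorem pvA_hline_eq (rw : List (Int × Int)) (r : Int) (n : Nat) :
    ∀ (a : Int) (acc : List String),
      pvA_hline rw r (a + n) (PySem.List.pyRange a (a + n + 1) 1) acc
      = acc ++ ((List.range n).flatMap fun (t : Nat) => [" ", if rw.contains (r, a + (t : Int)) then "-" else " "]) ++ [" "] := by
  induction n with
  | zero =>
    intro a acc
    rw [show a + ((0 : Nat) : Int) + 1 = a + 1 by omega, PySem.List.pyRange_one_singleton]
    simp [pvA_hline]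
  | succ n ih =>
    intro a acc
    rw [PySem.List.pyRange_one_cons (by omega)]
    have hne : ¬ (a = a + ((n + 1 : Nat) : Int)) := by push_cast; omega
    simp only [pvA_hline, if_neg hne]
    have h1 : a + ((n + 1 : Nat) : Int) = (a + 1) + (n : Int) := by push_cast; omega
    rw [h1, ih (a + 1), pv_flatMap_range_succ]
    have hf : ∀ (t : Nat), (a + 1) + (t : Int) = a + (((t + 1 : Nat)) : Int) := by
      intro t; push_cast; ring
    simp only [hf, Nat.cast_zero, add_zero, List.append_assoc, List.cons_append, List.nil_append]

-- A's vertical-line loop, characterised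
theorem pvA_vline_eq (cw : List (Int × Int)) (r : Int) (digits : List String) (n : Nat) :
    ∀ (a : Int) (acc : List String),
      pvA_vline cw r (a + n) digits (PySem.List.pyRange a (a + n + 1) 1) acc
      = acc ++ ((List.range n).flatMap fun (t : Nat) =>
            [if cw.contains (r, a + (t : Int)) then "|" else " ", (PySem.List.pyGet? digits (a + (t : Int))).getD ""])
        ++ [if cw.contains (r, a + n) then "|" else " "] := by
  induction n with
  | zero =>
    intro a acc
    rw [show a + ((0 : Nat) : Int) + 1 = a + 1 by omega, PySem.List.pyRange_one_singleton]
    simp [pvA_vline]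
  | succ n ih =>
    intro a acc
    rw [PySem.List.pyRange_one_cons (by omega)]
    have hne : ¬ (a = a + ((n + 1 : Nat) : Int)) := by push_cast; omega
    simp only [pvA_vline, if_neg hne]
    have h1 : a + ((n + 1 : Nat) : Int) = (a + 1) + (n : Int) := by push_cast; omega
    rw [h1, ih (a + 1), pv_flatMap_range_succ]
    have hf : ∀ (t : Nat), (a + 1) + (t : Int) = a + (((t + 1 : Nat)) : Int) := by
      intro t; push_cast; ring
    simp only [hf, Nat.cast_zero, add_zero, List.append_assoc, List.cons_append, List.nil_append]

-- A's outer loop, characterised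
theorem pvA_outer_eq (matrix : List (List String)) (rw cw : List (Int × Int)) (cols : Int) (n : Nat) :
    ∀ (a : Int) (lines : List String),
      pvA_outer matrix rw cw (a + n) cols (PySem.List.pyRange a (a + n + 1) 1) lines
      = lines
        ++ ((List.range n).flatMap fun (t : Nat) =>
            [PySem.Str.join "" (pvA_hline rw (a + (t : Int)) cols (PySem.List.pyRange 0 (cols + 1) 1) []) ++ "`",
             PySem.Str.join "" (pvA_vline cw (a + (t : Int)) cols ((PySem.List.pyGet? matrix (a + (t : Int))).getD [])
                (PySem.List.pyRange 0 (cols + 1) 1) []) ++ "`"])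
        ++ [PySem.Str.join "" (pvA_hline rw (a + n) cols (PySem.List.pyRange 0 (cols + 1) 1) []) ++ "`"] := by
  induction n with
  | zero =>
    intro a lines
    rw [show a + ((0 : Nat) : Int) + 1 = a + 1 by omega, PySem.List.pyRange_one_singleton]
    simp [pvA_outer]
  | succ n ih =>
    intro a lines
    rw [PySem.List.pyRange_one_cons (by omega)]
    have hne : ¬ (a = a + ((n + 1 : Nat) : Int)) := by push_cast; omega
    simp only [pvA_outer, if_neg hne]
    have h1 : a + ((n + 1 : Nat) : Int) = (a + 1) + (n : Int) := by push_cast; omega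
    rw [h1, ih (a + 1), pv_flatMap_range_succ]
    have hf : ∀ (t : Nat), (a + 1) + (t : Int) = a + (((t + 1 : Nat)) : Int) := by
      intro t; push_cast; ring
    simp only [hf, Nat.cast_zero, add_zero, List.append_assoc, List.cons_append, List.nil_append]

-- splitting range(0, 2n+1) into n (even, odd) pairs plus the final even index
theorem pv_pair_split {α : Type} (n : Nat) (f : Int → α) :
    (PySem.List.pyRange 0 (2 * (n : Int) + 1) 1).map f
    = ((List.range n).flatMap fun (t : Nat) => [f (2 * (t : Int)), f (2 * (t : Int) + 1)]) ++ [f (2 * (n : Int))] := by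
  induction n with
  | zero =>
    have h : PySem.List.pyRange 0 1 1 = [(0 : Int)] := by decide
    simp [h]
  | succ n ih =>
    rw [show 2 * ((n + 1 : Nat) : Int) + 1 = (2 * (n : Int) + 1) + 1 + 1 by push_cast; ring]
    rw [PySem.List.pyRange_one_succ_right (by omega), PySem.List.pyRange_one_succ_right (by omega)]
    simp only [List.map_append, ih, List.range_succ, List.flatMap_append, List.flatMap_cons,
      List.flatMap_nil, List.append_assoc, List.map_cons, List.map_nil]
    push_cast
    ring_nf
    simp [List.cons_append, List.nil_append]

-- an even grid row of B equals A's horizontal line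
theorem pv_even_line (matrix : List (List String)) (rw cw : List (Int × Int)) (t colsN : Nat) :
    ((PySem.List.pyRange 0 (2 * (colsN : Int) + 1) 1).map
        (fun j => pvB_cell matrix rw cw (2 * (t : Int)) j))
    = pvA_hline rw (t : Int) (colsN : Int) (PySem.List.pyRange 0 ((colsN : Int) + 1) 1) [] := by
  have hA := pvA_hline_eq rw (t : Int) colsN 0 []
  simp only [zero_add] at hA
  rw [hA, pv_pair_split]
  have hmodE : ∀ (s : Nat), (2 * (s : Int)) % 2 = 0 := by intro s; omega
  have hmodO : ∀ (s : Nat), (2 * (s : Int) + 1) % 2 = 1 := by intro s; omega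
  have hdivE : ∀ (s : Nat), (2 * (s : Int)) / 2 = (s : Int) := by intro s; omega
  have hdivO : ∀ (s : Nat), (2 * (s : Int) + 1) / 2 = (s : Int) := by intro s; omega
  simp [pvB_cell, hmodE, hmodO, hdivE, hdivO]

-- an odd grid row of B equals A's vertical line
theorem pv_odd_line (matrix : List (List String)) (rw cw : List (Int × Int)) (t colsN : Nat) :
    ((PySem.List.pyRange 0 (2 * (colsN : Int) + 1) 1).map
        (fun j => pvB_cell matrix rw cw (2 * (t : Int) + 1) j))
    = pvA_vline cw (t : Int) (colsN : Int) ((PySem.List.pyGet? matrix (t : Int)).getD [])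
        (PySem.List.pyRange 0 ((colsN : Int) + 1) 1) [] := by
  have hA := pvA_vline_eq cw (t : Int) ((PySem.List.pyGet? matrix (t : Int)).getD []) colsN 0 []
  simp only [zero_add] at hA
  rw [hA, pv_pair_split]
  have hmodE : ∀ (s : Nat), (2 * (s : Int)) % 2 = 0 := by intro s; omega
  have hmodO : ∀ (s : Nat), (2 * (s : Int) + 1) % 2 = 1 := by intro s; omega
  have hdivE : ∀ (s : Nat), (2 * (s : Int)) / 2 = (s : Int) := by intro s; omega
  have hdivO : ∀ (s : Nat), (2 * (s : Int) + 1) / 2 = (s : Int) := by intro s; omega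
  simp [pvB_cell, hmodE, hmodO, hdivE, hdivO]

set_option maxHeartbeats 1000000 in
theorem format_matrix_with_walls_spec : Claim_equal_format_matrix_with_walls := by
  intro matrix walls _ _
  unfold Spec_format_matrix_with_walls
  show PySem.Str.join "\n"
        (pvA_outer matrix walls.1 walls.2 (matrix.length : Int)
          (((PySem.List.pyGet? matrix 0).getD []).length : Int)
          (PySem.List.pyRange 0 ((matrix.length : Int) + 1) 1) [])
      = PySem.Str.join "\n"
        ((PySem.List.pyRange 0 (2 * (matrix.length : Int) + 1) 1).map fun i =>
          PySem.Str.join ""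
            ((PySem.List.pyRange 0 (2 * (((PySem.List.pyGet? matrix 0).getD []).length : Int) + 1) 1).map
              (fun j => pvB_cell matrix walls.1 walls.2 i j)) ++ "`")
  congr 1
  have hA := pvA_outer_eq matrix walls.1 walls.2
      (((PySem.List.pyGet? matrix 0).getD []).length : Int) matrix.length 0 []
  simp only [zero_add] at hA
  rw [hA, pv_pair_split matrix.length]
  simp only [List.nil_append]
  refine congrArg₂ (· ++ ·) ?_ ?_
  · refine congrFun (congrArg _ (funext fun t => ?_)) _
    simp only [pv_even_line, pv_odd_line]
  · simp only [pv_even_line]
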